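-- pv_equiv track=rewrite | github.com/sprotsman/algos_python | occurrences_in_list.py | occurrences
-- ===== SOURCE A (Python) =====
-- def occurrences(l):
--     counter = {}
--     for item in l:
--         if item not in counter:
--             counter[item] = 0
--         counter[item] += 1
--
--     result = ", ".join(f"{v}-{k}" for k, v in counter.items())
--
--     return result
-- ===== SOURCE B (Python) =====
-- def occurrences(l):
--     # extract-and-remove: repeatedly pull out the first value with all its
--     # duplicates (counting them in the same sweep), until the list is empty
--     parts = []
--     rest = list(l)
--     while rest:
--         head = rest[0]
--         cnt = 0
--         nxt = []
--         for x in rest: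
--             if x == head:
--                 cnt += 1
--             else:
--                 nxt.append(x)
--         parts.append(f"{cnt}-{head}")
--         rest = nxt
--     return ", ".join(parts)
-- ===== Notes on version B (the rewrite author's own statement) =====
-- stated objective: alternative
-- what changed: Replaces A's hash-dict tabulating pass with an extract-and-remove partition loop: repeatedly sweep the remaining list, counting the current first value and filtering out its duplicates, emitting one part per round; uses no dict/hashing at all, only equality.
import Mathlib
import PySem

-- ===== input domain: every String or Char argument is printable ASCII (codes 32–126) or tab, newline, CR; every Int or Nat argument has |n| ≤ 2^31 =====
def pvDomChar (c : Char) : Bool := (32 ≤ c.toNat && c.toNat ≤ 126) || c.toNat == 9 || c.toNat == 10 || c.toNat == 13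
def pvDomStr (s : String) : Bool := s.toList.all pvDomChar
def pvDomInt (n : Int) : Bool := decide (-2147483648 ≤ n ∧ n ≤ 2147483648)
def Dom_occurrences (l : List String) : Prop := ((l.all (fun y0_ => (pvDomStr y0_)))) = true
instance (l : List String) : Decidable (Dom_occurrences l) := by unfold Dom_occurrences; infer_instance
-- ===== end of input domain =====

-- B replaces A's dict-tabulating pass with an extract-and-remove partition loop (no dict); objective: alternative.

-- ===== PORT A =====
-- counter built element by element: initialise a missing key to 0, then counter[item] += 1
def occurrences (l : List String) : String :=
  let counter : PySem.Dict String Int :=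
    l.foldl (fun d item =>
      let d' := if d.contains item then d else d.insert item 0
      d'.insert item (d'.getD item 0 + 1)) PySem.Dict.empty
  PySem.Str.join ", " (counter.items.map (fun kv => PySem.Int.toStr kv.2 ++ "-" ++ kv.1))

-- ===== PORT B =====
-- inner 'for x in rest' sweep: count the head's duplicates and collect everything else
def occInner (head : String) (rest : List String) : Int × List String :=
  rest.foldl (fun p x => if x == head then (p.1 + 1, p.2) else (p.1, p.2 ++ [x])) (0, [])

-- needed for occAltLoop's termination: the sweep strictly shrinks the list
lemma occInner_foldl_aux (head : String) :
    ∀ (rest : List String) (c : Int) (acc : List String),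
      rest.foldl (fun p x => if x == head then (p.1 + 1, p.2) else (p.1, p.2 ++ [x])) (c, acc)
        = (c + (rest.count head : Nat), acc ++ rest.filter (fun x => !(x == head))) := by
  intro rest
  induction rest with
  | nil => intro c acc; simp
  | cons x t ih =>
    intro c acc
    by_cases h : x = head
    · subst h
      rw [List.foldl_cons, if_pos (by simp), ih]
      simp only [List.count_cons_self, List.filter_cons, beq_self_eq_true, Bool.not_true,
        Bool.false_eq_true, if_false, Prod.mk.injEq, and_true]
      push_cast
      ring
    · rw [List.foldl_cons, if_neg (by simp [h]), ih]
      simp [List.count_cons, h, List.filter_cons]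

lemma occInner_spec (head : String) (rest : List String) :
    occInner head rest = (((rest.count head : Nat) : Int), rest.filter (fun x => !(x == head))) := by
  rw [occInner, occInner_foldl_aux]
  simp

lemma occInner_snd_length_lt (head : String) (t : List String) :
    (occInner head (head :: t)).2.length < (head :: t).length := by
  rw [occInner_spec]
  simp only [List.filter_cons]
  have : (head == head) = true := by simp
  simp only [this, Bool.not_true]
  simpa using Nat.lt_succ_of_le (List.length_filter_le _ t)

-- while rest: sweep, emit one "cnt-head" part, continue on what remains
def occAltLoop (rest : List String) (parts : List String) : List String :=
  match rest with
  | [] => parts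
  | head :: t =>
    let p := occInner head (head :: t)
    occAltLoop p.2 (parts ++ [PySem.Int.toStr p.1 ++ "-" ++ head])
termination_by rest.length
decreasing_by exact occInner_snd_length_lt head t

def occurrences_alt (l : List String) : String :=
  PySem.Str.join ", " (occAltLoop l [])

-- ===== PRECONDITION & SPEC =====
def Spec_occurrences (l : List String) (out : String) : Prop := out = occurrences_alt l
instance (l : List String) (out : String) : Decidable (Spec_occurrences l out) := by unfold Spec_occurrences; infer_instance

-- ===== CLAIM (what is proved, stated in full; the proofs are below) =====
def Claim_equal_occurrences : Prop := ∀ (l : List String), Dom_occurrences l → Spec_occurrences l (occurrences l)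

-- ===== LEMMAS AND PROOFS =====

-- A's loop body is exactly the counting insert step
lemma occ_step (d : PySem.Dict String Int) (item : String) :
    (let d' := if d.contains item then d else d.insert item 0
     d'.insert item (d'.getD item 0 + 1)) = d.insert item (d.getD item 0 + 1) := by
  by_cases h : d.contains item = true
  · simp [h]
  · simp only [Bool.not_eq_true] at h
    simp [h, PySem.Dict.insert_insert_self, PySem.Dict.getD,
      (PySem.Dict.get?_eq_none_iff_contains d item).mpr h]

lemma occ_fold (l : List String) :
    l.foldl (fun d item =>
      let d' := if d.contains item then d else d.insert item 0
      d'.insert item (d'.getD item 0 + 1)) PySem.Dict.empty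
    = PySem.Dict.counter l := by
  rw [← PySem.Dict.foldl_insert_getD_add_one_eq_counter]
  apply PySem.List.foldl_congr_mem
  intro d item _
  exact occ_step d item

-- skipping already-seen elements: adds of a member are no-ops, so filtering them out changes nothing
lemma foldl_add_filter (h : String) :
    ∀ (xs s : List String), h ∈ s →
      xs.foldl PySem.Set.add s = (xs.filter (fun x => !(x == h))).foldl PySem.Set.add s := by
  intro xs
  induction xs with
  | nil => intro s _; rfl
  | cons x t ih =>
    intro s hs
    by_cases hx : x = h
    · subst hx
      have : PySem.Set.add s x = s := by
        simp [PySem.Set.add, PySem.Set.contains, hs]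
      simp [List.filter_cons, List.foldl_cons, this, ih s hs]
    · have hb : (x == h) = true → False := by simp [hx]
      have hmem : h ∈ PySem.Set.add s x := by
        simp [PySem.Set.add]
        split <;> simp [hs]
      simp [List.filter_cons, hx, List.foldl_cons, ih (PySem.Set.add s x) hmem]

-- an element absent from the rest of the input stays put at the front of the accumulator
lemma foldl_add_cons (h : String) :
    ∀ (xs s : List String), h ∉ xs →
      xs.foldl PySem.Set.add (h :: s) = h :: xs.foldl PySem.Set.add s := by
  intro xs
  induction xs with
  | nil => intro s _; rfl
  | cons x t ih =>
    intro s hx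
    have hxh : x ≠ h := fun e => hx (by simp [e])
    have hxt : h ∉ t := fun e => hx (by simp [e])
    rw [List.foldl_cons, List.foldl_cons]
    by_cases hc : x ∈ s
    · have e1 : PySem.Set.add (h :: s) x = h :: s := by
        simp [PySem.Set.add, PySem.Set.contains, hc]
      have e2 : PySem.Set.add s x = s := by
        simp [PySem.Set.add, PySem.Set.contains, hc]
      rw [e1, e2, ih s hxt]
    · have e1 : PySem.Set.add (h :: s) x = h :: (s ++ [x]) := by
        simp [PySem.Set.add, PySem.Set.contains, hxh, hc]
      have e2 : PySem.Set.add s x = s ++ [x] := by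
        simp [PySem.Set.add, PySem.Set.contains, hc]
      rw [e1, e2, ih (s ++ [x]) hxt]

-- dedup of a nonempty list: the head, then dedup of the tail with the head's duplicates removed
lemma dedup_cons_filter (h : String) (t : List String) :
    PySem.List.dedup (h :: t) = h :: PySem.List.dedup (t.filter (fun x => !(x == h))) := by
  have h1 : PySem.List.dedup (h :: t) = (h :: t).foldl PySem.Set.add [] := by
    rw [PySem.List.dedup_eq_ofList, PySem.Set.ofList_eq_foldl]
  have h2 : PySem.List.dedup (t.filter (fun x => !(x == h)))
      = (t.filter (fun x => !(x == h))).foldl PySem.Set.add [] := by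
    rw [PySem.List.dedup_eq_ofList, PySem.Set.ofList_eq_foldl]
  have hadd : PySem.Set.add [] h = [h] := by simp [PySem.Set.add, PySem.Set.contains]
  have hnot : h ∉ t.filter (fun x => !(x == h)) := by
    intro hm
    have := List.of_mem_filter hm
    simp at this
  rw [h1, h2, List.foldl_cons, hadd,
    foldl_add_filter h t [h] (by simp),
    show ([h] : List String) = h :: [] from rfl,
    foldl_add_cons h _ [] hnot]

-- the loop's accumulated parts are the per-distinct-value formatted counts
lemma occAltLoop_eq :
    ∀ (n : Nat) (rest parts : List String), rest.length ≤ n →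
      occAltLoop rest parts
        = parts ++ (PySem.List.dedup rest).map
            (fun k => PySem.Int.toStr ((rest.count k : Nat) : Int) ++ "-" ++ k) := by
  intro n
  induction n with
  | zero =>
    intro rest parts hlen
    have : rest = [] := List.eq_nil_of_length_eq_zero (Nat.le_zero.mp hlen)
    subst this
    simp [occAltLoop, PySem.List.dedup]
  | succ n ih =>
    intro rest parts hlen
    match rest with
    | [] => simp [occAltLoop, PySem.List.dedup]
    | head :: t =>
      rw [occAltLoop]
      simp only [occInner_spec]
      have hlen' : (t.filter (fun x => !(x == head))).length ≤ n := by
        have := List.length_filter_le (fun x => !(x == head)) t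
        simp only [List.length_cons] at hlen
        omega
      have hfilter : ((head :: t).filter (fun x => !(x == head)))
          = t.filter (fun x => !(x == head)) := by
        simp [List.filter_cons]
      rw [hfilter, ih _ _ hlen', dedup_cons_filter, List.append_assoc]
      congr 1
      simp only [List.map_cons, List.singleton_append]
      congr 1
      apply List.map_congr_left
      intro k hk
      have hkmem : k ∈ t.filter (fun x => !(x == head)) := by simpa using hk
      have hkne : k ≠ head := by
        have := List.of_mem_filter hkmem
        simpa using this
      have hcount : (t.filter (fun x => !(x == head))).count k = (head :: t).count k := by
        have h1 : (head :: t).count k = t.count k := by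
          simp [List.count_cons, Ne.symm hkne]
        have h2 : ∀ u : List String, (u.filter (fun x => !(x == head))).count k = u.count k := by
          intro u
          induction u with
          | nil => rfl
          | cons y ys ihy =>
            by_cases hy : y = head
            · subst hy
              simp [List.count_cons, Ne.symm hkne, ihy]
            · simp [List.filter_cons, hy, List.count_cons, ihy]
        rw [h1, h2]
      rw [hcount]

-- ===== VERDICT (by name: the statement is the Claim_ definition above) =====
theorem occurrences_spec : Claim_equal_occurrences := by
  intro l _
  show occurrences l = occurrences_alt l
  simp only [occurrences, occurrences_alt, occ_fold, PySem.Dict.items_counter,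
    PySem.List.dedup_eq_ofList, List.map_map,
    occAltLoop_eq l.length l [] (le_refl _)]
  rfl
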